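-- pv_equiv track=rewrite | github.com/adrianmalecki/PEA1 | branch_and_bound.py | prepare_graph
-- ===== SOURCE A (Python) =====
-- def prepare_graph(input_graph, row, column, visited):
--     size = len(input_graph)
--     output_graph = []
--     for r in range(size):
--         temp = []
--         for c in range(size):
--             if r == row or c == column:
--                 temp.append(-1)
--             elif c in visited[:-1] and r in visited[-1:]:
--                 temp.append(-1)
--             else:
--                 temp.append(input_graph[r][c])
--         output_graph.append(temp)
--     return output_graph
-- ===== SOURCE B (Python) =====
-- def prepare_graph(input_graph, row, column, visited):
--     size = len(input_graph)
--     output = [r[:size] for r in input_graph]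
--     if 0 <= row < size:
--         output[row] = [-1] * size
--     if 0 <= column < size:
--         for out_row in output:
--             out_row[column] = -1
--     if visited:
--         last = visited[-1]
--         if 0 <= last < size:
--             for c in visited[:-1]:
--                 if 0 <= c < size:
--                     output[last][c] = -1
--     return output
-- ===== Notes on version B (the rewrite author's own statement) =====
-- stated objective: faster
-- what changed: Replaces A's per-cell conditional scan (which re-slices visited and does a membership test for every cell) with a copy of the matrix followed by three targeted masking passes: overwrite the masked row, the masked column, and the visited cells of the last-visited row.
-- outside the precondition, e.g. on prepare_graph([[5], [7, 8]], -5, 1, []): A returns [[5, -1], [7, -1]], B raises IndexError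
import Mathlib
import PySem

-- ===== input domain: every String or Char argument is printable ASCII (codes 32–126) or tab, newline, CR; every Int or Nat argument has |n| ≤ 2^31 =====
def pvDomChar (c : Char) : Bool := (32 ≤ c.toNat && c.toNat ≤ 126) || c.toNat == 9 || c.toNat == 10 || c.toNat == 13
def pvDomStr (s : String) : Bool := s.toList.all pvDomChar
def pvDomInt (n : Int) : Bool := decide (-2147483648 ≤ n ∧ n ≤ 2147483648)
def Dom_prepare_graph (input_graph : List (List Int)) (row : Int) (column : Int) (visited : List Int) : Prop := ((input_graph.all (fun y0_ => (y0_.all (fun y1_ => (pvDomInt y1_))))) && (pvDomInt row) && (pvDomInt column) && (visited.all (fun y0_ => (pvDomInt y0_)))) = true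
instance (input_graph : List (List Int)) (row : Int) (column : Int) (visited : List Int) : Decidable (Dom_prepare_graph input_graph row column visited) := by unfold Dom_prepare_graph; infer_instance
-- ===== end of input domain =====

-- B masks by three targeted overwrite passes after copying the matrix, instead of A's per-cell
-- conditional scan; equivalence is about the return value only (neither program mutates its input).

-- ===== PORT A =====
-- literal transliteration of A: nested range loops, per-cell branch; the read input_graph[r][c]
-- is ported with getD (exact under Pre_, which guarantees r < len and c < len of that row)
def prepare_graph (input_graph : List (List Int)) (row : Int) (column : Int) (visited : List Int) : List (List Int) :=
  let size := input_graph.length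
  (List.range size).map (fun (r : Nat) =>
    (List.range size).map (fun (c : Nat) =>
      if (r : Int) = row ∨ (c : Int) = column then -1
      else if (c : Int) ∈ PySem.List.slice visited none (some (-1)) ∧
              (r : Int) ∈ PySem.List.slice visited (some (-1)) none then -1
      else (input_graph.getD r []).getD c 0))

-- ===== PORT B =====
-- transliteration of Source B: copy rows truncated to size, overwrite masked row, overwrite masked
-- column, then overwrite the visited cells of the last-visited row
def prepare_graph_alt (input_graph : List (List Int)) (row : Int) (column : Int) (visited : List Int) : List (List Int) :=
  let size := input_graph.length
  let out0 := input_graph.map (fun ri => ri.take size)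
  let out1 := if 0 ≤ row ∧ row < (size : Int) then out0.set row.toNat (List.replicate size (-1)) else out0
  let out2 := if 0 ≤ column ∧ column < (size : Int) then out1.map (fun ri => ri.set column.toNat (-1)) else out1
  match visited.getLast? with
  | none => out2
  | some last =>
      if 0 ≤ last ∧ last < (size : Int) then
        out2.set last.toNat
          (visited.dropLast.foldl
            (fun rw c => if 0 ≤ c ∧ c < (size : Int) then rw.set c.toNat (-1) else rw)
            (out2.getD last.toNat []))
      else out2

-- ===== PRECONDITION & SPEC =====
-- Pre_ excludes ragged matrices (a row shorter than the matrix): there A reads input_graph[r][c]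
-- and raises IndexError unless the short cells happen to be masked, and B's direct column writes
-- raise IndexError.
def Pre_prepare_graph (input_graph : List (List Int)) (row : Int) (column : Int) (visited : List Int) : Prop :=
  ∀ ri ∈ input_graph, input_graph.length ≤ ri.length
instance (input_graph : List (List Int)) (row : Int) (column : Int) (visited : List Int) : Decidable (Pre_prepare_graph input_graph row column visited) := by unfold Pre_prepare_graph; infer_instance
def pvWitness_prepare_graph : List (List Int) × Int × Int × List Int := ([[1, 2], [3, 4]], 0, 1, [1, 0])
def Spec_prepare_graph (input_graph : List (List Int)) (row : Int) (column : Int) (visited : List Int) (out : List (List Int)) : Prop := out = prepare_graph_alt input_graph row column visited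
instance (input_graph : List (List Int)) (row : Int) (column : Int) (visited : List Int) (out : List (List Int)) : Decidable (Spec_prepare_graph input_graph row column visited out) := by unfold Spec_prepare_graph; infer_instance

-- ===== CLAIM (what is proved, stated in full; the proofs are below) =====
def Claim_equal_prepare_graph : Prop := ∀ (input_graph : List (List Int)) (row : Int) (column : Int) (visited : List Int), Dom_prepare_graph input_graph row column visited → Pre_prepare_graph input_graph row column visited → Spec_prepare_graph input_graph row column visited (prepare_graph input_graph row column visited)

-- ===== LEMMAS AND PROOFS =====

-- x ∈ l[-1:]  ↔  l ends in x
lemma mem_drop_length_sub_one {α : Type} (l : List α) (x : α) :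
    x ∈ l.drop (l.length - 1) ↔ l.getLast? = some x := by
  induction l with
  | nil => simp
  | cons a t ih =>
    cases t with
    | nil => simp [eq_comm]
    | cons b u =>
      have h1 : (a :: b :: u).length - 1 = (b :: u).length - 1 + 1 := by simp
      rw [h1, List.drop_succ_cons, ih, List.getLast?_cons_cons]

-- length is preserved by the visited-masking fold
lemma fold_mask_length (n : Int) (l : List Int) (rw : List Int) :
    (l.foldl (fun rw c => if 0 ≤ c ∧ c < n then rw.set c.toNat (-1) else rw) rw).length
      = rw.length := by
  induction l generalizing rw with
  | nil => rfl
  | cons a t ih =>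
    simp only [List.foldl_cons]
    split
    · rw [ih]; simp
    · exact ih rw

-- cell of the visited-masking fold
lemma fold_mask_get (n : Int) (l : List Int) (rw : List Int) (c : Nat) (hc : c < rw.length) :
    (l.foldl (fun rw c => if 0 ≤ c ∧ c < n then rw.set c.toNat (-1) else rw) rw)[c]?
      = if ∃ x ∈ l, 0 ≤ x ∧ x < n ∧ x.toNat = c then some (-1) else rw[c]? := by
  induction l generalizing rw with
  | nil => simp
  | cons a t ih =>
    simp only [List.foldl_cons]
    by_cases ha : 0 ≤ a ∧ a < n
    · rw [if_pos ha, ih _ (by simpa using hc)]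
      by_cases hac : a.toNat = c
      · have hcond : ∃ x ∈ a :: t, 0 ≤ x ∧ x < n ∧ x.toNat = c :=
          ⟨a, List.mem_cons_self .., ha.1, ha.2, hac⟩
        rw [if_pos hcond]
        by_cases ht : ∃ x ∈ t, 0 ≤ x ∧ x < n ∧ x.toNat = c
        · simp [ht]
        · simp [ht, hac, hc]
      · have hiff : (∃ x ∈ a :: t, 0 ≤ x ∧ x < n ∧ x.toNat = c) ↔
            (∃ x ∈ t, 0 ≤ x ∧ x < n ∧ x.toNat = c) := by
          constructor
          · rintro ⟨x, hx, h0, h1, h2⟩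
            rcases List.mem_cons.mp hx with rfl | hx'
            · exact absurd h2 hac
            · exact ⟨x, hx', h0, h1, h2⟩
          · rintro ⟨x, hx, h⟩; exact ⟨x, List.mem_cons_of_mem _ hx, h⟩
        simp only [hiff]
        by_cases ht : ∃ x ∈ t, 0 ≤ x ∧ x < n ∧ x.toNat = c
        · simp [ht]
        · simp [ht, hac]
    · rw [if_neg ha, ih _ hc]
      have hiff : (∃ x ∈ a :: t, 0 ≤ x ∧ x < n ∧ x.toNat = c) ↔
          (∃ x ∈ t, 0 ≤ x ∧ x < n ∧ x.toNat = c) := by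
        constructor
        · rintro ⟨x, hx, h0, h1, h2⟩
          rcases List.mem_cons.mp hx with rfl | hx'
          · exact absurd ⟨h0, h1⟩ ha
          · exact ⟨x, hx', h0, h1, h2⟩
        · rintro ⟨x, hx, h⟩; exact ⟨x, List.mem_cons_of_mem _ hx, h⟩
      simp only [hiff]


-- the per-cell value both programs compute
def maskCell (g : List (List Int)) (row column : Int) (vis : List Int) (r c : Nat) : Int :=
  if (r : Int) = row ∨ (c : Int) = column then -1
  else if (c : Int) ∈ vis.dropLast ∧ vis.getLast? = some (r : Int) then -1
  else (g.getD r []).getD c 0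

-- A in map-of-maskCell form
lemma A_eq (g : List (List Int)) (row column : Int) (vis : List Int) :
    prepare_graph g row column vis
      = (List.range g.length).map (fun r => (List.range g.length).map (maskCell g row column vis r)) := by
  unfold prepare_graph maskCell
  simp only [PySem.List.slice_to_neg_one, PySem.List.slice_from_neg_one, mem_drop_length_sub_one]

-- B's matrix after the row and column passes
def bOut2 (g : List (List Int)) (row column : Int) : List (List Int) :=
  let size := g.length
  let out0 := g.map (fun ri => ri.take size)
  let out1 := if 0 ≤ row ∧ row < (size : Int) then out0.set row.toNat (List.replicate size (-1)) else out0
  if 0 ≤ column ∧ column < (size : Int) then out1.map (fun ri => ri.set column.toNat (-1)) else out1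

lemma alt_eq (g : List (List Int)) (row column : Int) (vis : List Int) :
    prepare_graph_alt g row column vis
      = match vis.getLast? with
        | none => bOut2 g row column
        | some last =>
            if 0 ≤ last ∧ last < (g.length : Int) then
              (bOut2 g row column).set last.toNat
                (vis.dropLast.foldl
                  (fun rw c => if 0 ≤ c ∧ c < (g.length : Int) then rw.set c.toNat (-1) else rw)
                  ((bOut2 g row column).getD last.toNat []))
            else bOut2 g row column := rfl

lemma bOut2_row (g : List (List Int)) (row column : Int) (r : Nat) (hr : r < g.length) :
    (bOut2 g row column)[r]? = some (
      let base := if 0 ≤ row ∧ row < (g.length : Int) ∧ r = row.toNat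
                  then List.replicate g.length (-1) else (g[r]'hr).take g.length
      if 0 ≤ column ∧ column < (g.length : Int) then base.set column.toNat (-1) else base) := by
  unfold bOut2
  by_cases hcol : 0 ≤ column ∧ column < (g.length : Int) <;>
    by_cases hrow : 0 ≤ row ∧ row < (g.length : Int) <;>
      by_cases hrr : r = row.toNat <;>
        simp [hcol, hrow, hrr, hr, List.getElem?_set, List.getElem?_map,
          List.getElem_set, List.getElem_map, List.getElem?_eq_getElem] <;>
        (try exact fun h => absurd h.symm hrr) <;>
        (try exact ⟨_, List.getElem?_eq_getElem (by omega), rfl⟩)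

lemma bOut2_row_length (g : List (List Int)) (row column : Int)
    (hPre : ∀ ri ∈ g, g.length ≤ ri.length) (r : Nat) (hr : r < g.length) (w : List Int)
    (hw : (bOut2 g row column)[r]? = some w) : w.length = g.length := by
  rw [bOut2_row g row column r hr] at hw
  have htake : ((g[r]'hr).take g.length).length = g.length := by
    simp
    exact hPre _ (List.getElem_mem hr)
  cases hw
  split_ifs <;> simp [htake]

lemma bOut2_length (g : List (List Int)) (row column : Int) :
    (bOut2 g row column).length = g.length := by
  unfold bOut2; dsimp only; split_ifs <;> simp

-- cell of bOut2: row/column masking over the copied matrix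
lemma bOut2_cell (g : List (List Int)) (row column : Int)
    (hPre : ∀ ri ∈ g, g.length ≤ ri.length)
    (r c : Nat) (hr : r < g.length) (hc : c < g.length) (w : List Int)
    (hw : (bOut2 g row column)[r]? = some w) :
    w[c]? = some (if (r : Int) = row ∨ (c : Int) = column then -1 else (g.getD r []).getD c 0) := by
  rw [bOut2_row g row column r hr] at hw
  cases hw
  have hlen : g.length ≤ (g[r]'hr).length := hPre _ (List.getElem_mem hr)
  dsimp only
  set base := (if 0 ≤ row ∧ row < (g.length : Int) ∧ r = row.toNat
               then List.replicate g.length (-1) else (g[r]'hr).take g.length) with hbdef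
  have hblen : base.length = g.length := by
    rw [hbdef]; split_ifs <;> simp <;> omega
  have hbget : base[c]? = some (if (r : Int) = row then -1 else (g.getD r []).getD c 0) := by
    rw [hbdef]
    by_cases h1 : 0 ≤ row ∧ row < (g.length : Int) ∧ r = row.toNat
    · have hrr : (r : Int) = row := by omega
      rw [if_pos h1, if_pos hrr]
      simp [hc]
    · have hnr : ¬ (r : Int) = row := by omega
      have hcr : c < (g[r]'hr).length := by omega
      rw [if_neg h1, if_neg hnr]
      simp [List.getElem?_take, hc, List.getD, List.getElem?_eq_getElem hr,
        List.getElem?_eq_getElem hcr]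
  by_cases h2 : 0 ≤ column ∧ column < (g.length : Int)
  · rw [if_pos h2, List.getElem?_set]
    by_cases h3 : column.toNat = c
    · have hcc : (c : Int) = column := by omega
      simp [h3, hblen, hc, hcc]
    · have hcc : ¬ (c : Int) = column := by omega
      rw [if_neg h3, hbget]
      simp [hcc]
  · have hcc : ¬ (c : Int) = column := by omega
    rw [if_neg h2, hbget]
    simp [hcc]


lemma alt_len (g : List (List Int)) (row column : Int) (vis : List Int) :
    (prepare_graph_alt g row column vis).length = g.length := by
  rw [alt_eq]
  cases vis.getLast? with
  | none => exact bOut2_length g row column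
  | some last =>
    dsimp only
    split_ifs <;> simp [bOut2_length]

lemma alt_row_len (g : List (List Int)) (row column : Int) (vis : List Int)
    (hPre : ∀ ri ∈ g, g.length ≤ ri.length) (r : Nat) (hr : r < g.length) (w : List Int)
    (hw : (prepare_graph_alt g row column vis)[r]? = some w) : w.length = g.length := by
  rw [alt_eq] at hw
  cases hv : vis.getLast? with
  | none => rw [hv] at hw; dsimp only at hw; exact bOut2_row_length g row column hPre r hr w hw
  | some last =>
    rw [hv] at hw; dsimp only at hw
    by_cases hl : 0 ≤ last ∧ last < (g.length : Int)
    · rw [if_pos hl, List.getElem?_set] at hw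
      by_cases hrl : last.toNat = r
      · rw [if_pos hrl, if_pos (by rw [bOut2_length]; omega)] at hw
        cases hw
        rw [fold_mask_length]
        have hlt : last.toNat < g.length := by omega
        have hwl : (bOut2 g row column)[last.toNat]? =
            some ((bOut2 g row column)[last.toNat]'(by rw [bOut2_length]; omega)) :=
          List.getElem?_eq_getElem _
        have hl2 := bOut2_row_length g row column hPre last.toNat hlt _ hwl
        simp [List.getD, hwl, hl2]
      · rw [if_neg hrl] at hw; exact bOut2_row_length g row column hPre r hr w hw
    · rw [if_neg hl] at hw; exact bOut2_row_length g row column hPre r hr w hw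

lemma alt_row_get (g : List (List Int)) (row column : Int) (vis : List Int)
    (hPre : ∀ ri ∈ g, g.length ≤ ri.length) (r c : Nat) (hr : r < g.length) (hc : c < g.length)
    (w : List Int) (hw : (prepare_graph_alt g row column vis)[r]? = some w) :
    w[c]? = some (maskCell g row column vis r c) := by
  rw [alt_eq] at hw
  unfold maskCell
  cases hv : vis.getLast? with
  | none =>
    rw [hv] at hw; dsimp only at hw
    rw [bOut2_cell g row column hPre r c hr hc w hw]
    by_cases h1 : (r : Int) = row ∨ (c : Int) = column
    · simp [h1]
    · simp [h1]
  | some last =>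
    rw [hv] at hw; dsimp only at hw
    by_cases hl : 0 ≤ last ∧ last < (g.length : Int)
    · rw [if_pos hl, List.getElem?_set] at hw
      by_cases hrl : last.toNat = r
      · rw [if_pos hrl, if_pos (by rw [bOut2_length]; omega)] at hw
        cases hw
        have hlt : last.toNat < g.length := by omega
        have hwl : (bOut2 g row column)[last.toNat]? =
            some ((bOut2 g row column)[last.toNat]'(by rw [bOut2_length]; omega)) :=
          List.getElem?_eq_getElem _
        have hwlen := bOut2_row_length g row column hPre last.toNat hlt _ hwl
        have hinit : (bOut2 g row column).getD last.toNat [] =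
            (bOut2 g row column)[last.toNat]'(by rw [bOut2_length]; omega) := by
          simp [List.getD, hwl]
        rw [hinit, fold_mask_get _ _ _ c (by rw [hwlen]; exact hc)]
        have hcellr := bOut2_cell g row column hPre last.toNat c hlt hc _ hwl
        have hlr : last = (r : Int) := by omega
        have hmem : (∃ x ∈ vis.dropLast, 0 ≤ x ∧ x < (g.length : Int) ∧ x.toNat = c) ↔
            (c : Int) ∈ vis.dropLast := by
          constructor
          · rintro ⟨x, hx, h0, h1, h2⟩
            have hxc : x = (c : Int) := by omega
            rwa [hxc] at hx
          · intro hm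
            exact ⟨(c : Int), hm, by omega, by omega, by omega⟩
        by_cases hm : (c : Int) ∈ vis.dropLast
        · rw [if_pos (hmem.mpr hm)]
          by_cases h1 : (r : Int) = row ∨ (c : Int) = column
          · simp [h1]
          · simp [h1, hm, hlr]
        · rw [if_neg (fun h => hm (hmem.mp h)), hcellr, hrl]
          by_cases h1 : (r : Int) = row ∨ (c : Int) = column
          · simp [h1]
          · simp [h1, hm]
      · rw [if_neg hrl] at hw
        rw [bOut2_cell g row column hPre r c hr hc w hw]
        have hner : ¬ last = (r : Int) := by omega
        by_cases h1 : (r : Int) = row ∨ (c : Int) = column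
        · simp [h1]
        · simp [h1, hner]
    · rw [if_neg hl] at hw
      rw [bOut2_cell g row column hPre r c hr hc w hw]
      have hner : ¬ last = (r : Int) := by omega
      by_cases h1 : (r : Int) = row ∨ (c : Int) = column
      · simp [h1]
      · simp [h1, hner]

-- ===== VERDICT (by name: the statement is the Claim_ definition above) =====
theorem prepare_graph_spec : Claim_equal_prepare_graph := by
  intro g row column vis _ hPre
  unfold Spec_prepare_graph
  rw [A_eq]
  apply List.ext_getElem?
  intro r
  by_cases hr : r < g.length
  · rw [List.getElem?_map, List.getElem?_range hr]
    have hw : (prepare_graph_alt g row column vis)[r]? =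
        some ((prepare_graph_alt g row column vis)[r]'(by rw [alt_len]; exact hr)) :=
      List.getElem?_eq_getElem _
    rw [hw, Option.map_some]
    congr 1
    apply List.ext_getElem?
    intro c
    by_cases hc : c < g.length
    · rw [List.getElem?_map, List.getElem?_range hc, Option.map_some]
      exact (alt_row_get g row column vis hPre r c hr hc _ hw).symm
    · have h1 : (List.range g.length)[c]? = none :=
        List.getElem?_eq_none (by simpa using le_of_not_gt hc)
      rw [List.getElem?_map, h1, Option.map_none]
      exact (List.getElem?_eq_none
        (by rw [alt_row_len g row column vis hPre r hr _ hw]; omega)).symm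
  · have h1 : (List.range g.length)[r]? = none :=
      List.getElem?_eq_none (by simpa using le_of_not_gt hr)
    rw [List.getElem?_map, h1, Option.map_none]
    exact (List.getElem?_eq_none (by rw [alt_len]; omega)).symm
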